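-- pv_equiv track=rewrite | github.com/haitranduc4270/Graph | src/gnn-rag/get_entities.py | parse_output_text
-- ===== SOURCE A (Python) =====
-- def parse_output_text(output_text):
--     """
--     Parse the raw text output from Gemini API into structured entities and relationships.
--
--     Args:
--         output_text (str): Raw response from Gemini model.
--
--     Returns:
--         tuple: A tuple (entities, relationships) where:
--             - entities is a list of dictionaries { "entity": ..., "type": ... }
--             - relationships is a list of dictionaries { "from": ..., "relation": ..., "to": ... }
--     """
--     entities = []
--     relationships = []
--     lines = output_text.strip().split('\n')
--     section = None
--
--     for line in lines:
--         line = line.strip()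
--         if line.startswith("Entities:"):
--             section = "entities"
--             continue
--         elif line.startswith("Relationships:"):
--             section = "relationships"
--             continue
--         elif line.startswith("-"):
--             if section == "entities":
--                 # Format: - {Entity}: {Type}
--                 parts = line.strip("- ").split(":")
--                 if len(parts) == 2:
--                     entity = parts[0].strip(" {}")
--                     entity_type = parts[1].strip(" {}")
--                     entities.append({"entity": entity, "type": entity_type})
--             elif section == "relationships":
--                 # Format: - (Entity1, Relationship, Entity2)
--                 content = line.strip("- ()")
--                 parts = [p.strip() for p in content.split(",")]
--                 if len(parts) == 3:
--                     relationships.append({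
--                         "from": parts[0],
--                         "relation": parts[1],
--                         "to": parts[2]
--                     })
--     return entities, relationships
-- ===== SOURCE B (Python) =====
-- def _parse_entity(line):
--     if not line.startswith("-"):
--         return None
--     parts = line.strip("- ").split(":")
--     if len(parts) != 2:
--         return None
--     return {"entity": parts[0].strip(" {}"), "type": parts[1].strip(" {}")}
--
--
-- def _parse_rel(line):
--     if not line.startswith("-"):
--         return None
--     parts = [p.strip() for p in line.strip("- ()").split(",")]
--     if len(parts) != 3:
--         return None
--     return {"from": parts[0], "relation": parts[1], "to": parts[2]}
--
--
-- def parse_output_text(output_text):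
--     # Phase 1: bucket stripped non-header lines under the active section.
--     ent_lines, rel_lines = [], []
--     section = None
--     for raw in output_text.strip().split('\n'):
--         line = raw.strip()
--         if line.startswith("Entities:"):
--             section = 'e'
--         elif line.startswith("Relationships:"):
--             section = 'r'
--         elif section == 'e':
--             ent_lines.append(line)
--         elif section == 'r':
--             rel_lines.append(line)
--     # Phase 2: two independent dedicated parsing passes.
--     entities = [d for d in map(_parse_entity, ent_lines) if d is not None]
--     relationships = [d for d in map(_parse_rel, rel_lines) if d is not None]
--     return entities, relationships
-- ===== Notes on version B (the rewrite author's own statement) =====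
-- stated objective: alternative
-- what changed: A's single stateful loop that parses while tracking the current section is split into a bucketing pass that groups stripped lines under their active section, followed by two independent dedicated parsing passes (entity parser and relationship parser) over the buckets.
import Mathlib
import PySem

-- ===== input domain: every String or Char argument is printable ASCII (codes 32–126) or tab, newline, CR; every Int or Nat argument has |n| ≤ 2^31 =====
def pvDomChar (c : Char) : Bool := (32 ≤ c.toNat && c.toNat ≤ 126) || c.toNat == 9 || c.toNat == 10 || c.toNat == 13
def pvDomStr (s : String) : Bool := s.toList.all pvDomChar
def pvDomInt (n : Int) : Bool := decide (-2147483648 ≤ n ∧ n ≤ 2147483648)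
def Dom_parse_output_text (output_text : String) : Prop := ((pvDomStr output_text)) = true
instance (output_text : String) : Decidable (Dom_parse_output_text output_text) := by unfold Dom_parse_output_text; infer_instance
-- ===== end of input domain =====

-- B re-decomposes A's single stateful loop into a bucketing pass plus two dedicated
-- per-section parsing passes (objective: alternative decomposition, same cost).

-- ===== PORT A =====
-- the for-loop of A, state = (section, entities, relationships); branches in A's order
def pvLoopA : List String → Option String →
    List (List (String × String)) → List (List (String × String)) →
    (List (List (String × String))) × (List (List (String × String)))
  | [], _, ents, rels => (ents, rels)
  | raw :: rest, sect, ents, rels =>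
    let line := PySem.Str.strip raw
    if PySem.Str.startswith line "Entities:" then
      pvLoopA rest (some "entities") ents rels
    else if PySem.Str.startswith line "Relationships:" then
      pvLoopA rest (some "relationships") ents rels
    else if PySem.Str.startswith line "-" then
      if sect == some "entities" then
        -- parts = line.strip("- ").split(":"); if len(parts) == 2: index 0 and 1
        match (PySem.Str.split? (PySem.Str.stripChars line "- ") ":").getD [] with
        | [p0, p1] =>
          pvLoopA rest sect
            (ents ++ [[("entity", PySem.Str.stripChars p0 " {}"),
                       ("type", PySem.Str.stripChars p1 " {}")]]) rels
        | _ => pvLoopA rest sect ents rels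
      else if sect == some "relationships" then
        -- parts = [p.strip() for p in line.strip("- ()").split(",")]; if len(parts) == 3
        match ((PySem.Str.split? (PySem.Str.stripChars line "- ()") ",").getD []).map PySem.Str.strip with
        | [p0, p1, p2] =>
          pvLoopA rest sect ents
            (rels ++ [[("from", p0), ("relation", p1), ("to", p2)]])
        | _ => pvLoopA rest sect ents rels
      else pvLoopA rest sect ents rels
    else pvLoopA rest sect ents rels

def parse_output_text (output_text : String) : (List (List (String × String))) × (List (List (String × String))) :=
  pvLoopA ((PySem.Str.split? (PySem.Str.strip output_text) "\n").getD []) none [] []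

-- ===== PORT B =====
def pvParseEntity (line : String) : Option (List (String × String)) :=
  if PySem.Str.startswith line "-" then
    match (PySem.Str.split? (PySem.Str.stripChars line "- ") ":").getD [] with
    | [p0, p1] => some [("entity", PySem.Str.stripChars p0 " {}"),
                        ("type", PySem.Str.stripChars p1 " {}")]
    | _ => none
  else none

def pvParseRel (line : String) : Option (List (String × String)) :=
  if PySem.Str.startswith line "-" then
    match ((PySem.Str.split? (PySem.Str.stripChars line "- ()") ",").getD []).map PySem.Str.strip with
    | [p0, p1, p2] => some [("from", p0), ("relation", p1), ("to", p2)]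
    | _ => none
  else none

-- phase 1: bucket stripped non-header lines under the active section (true = entities)
def pvBucket : List String → Option Bool → List String × List String
  | [], _ => ([], [])
  | raw :: rest, sec =>
    let line := PySem.Str.strip raw
    if PySem.Str.startswith line "Entities:" then pvBucket rest (some true)
    else if PySem.Str.startswith line "Relationships:" then pvBucket rest (some false)
    else match sec with
      | some true  => let p := pvBucket rest sec; (line :: p.1, p.2)
      | some false => let p := pvBucket rest sec; (p.1, line :: p.2)
      | none => pvBucket rest none

def parse_output_text_alt (output_text : String) : (List (List (String × String))) × (List (List (String × String))) :=
  let b := pvBucket ((PySem.Str.split? (PySem.Str.strip output_text) "\n").getD []) none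
  (b.1.filterMap pvParseEntity, b.2.filterMap pvParseRel)

-- ===== PRECONDITION & SPEC =====
def Spec_parse_output_text (output_text : String) (out : (List (List (String × String))) × (List (List (String × String)))) : Prop := out = parse_output_text_alt output_text
instance (output_text : String) (out : (List (List (String × String))) × (List (List (String × String)))) : Decidable (Spec_parse_output_text output_text out) := by unfold Spec_parse_output_text; infer_instance

-- ===== CLAIM (what is proved, stated in full; the proofs are below) =====
def Claim_equal_parse_output_text : Prop := ∀ (output_text : String), Dom_parse_output_text output_text → Spec_parse_output_text output_text (parse_output_text output_text)

-- ===== LEMMAS AND PROOFS =====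
def pvSecMap : Option String → Option Bool
  | some "entities" => some true
  | some "relationships" => some false
  | _ => none

lemma pvLoop_eq_bucket (lines : List String) :
    ∀ (sec : Option String) (ents rels : List (List (String × String))),
      (sec = none ∨ sec = some "entities" ∨ sec = some "relationships") →
      pvLoopA lines sec ents rels =
        (ents ++ (pvBucket lines (pvSecMap sec)).1.filterMap pvParseEntity,
         rels ++ (pvBucket lines (pvSecMap sec)).2.filterMap pvParseRel) := by
  induction lines with
  | nil => intro sec ents rels _; simp [pvLoopA, pvBucket]
  | cons raw rest ih =>
    intro sec ents rels hsec
    rw [pvLoopA.eq_def, pvBucket.eq_def]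
    by_cases h1 : PySem.Str.startswith (PySem.Str.strip raw) "Entities:"
    · simp only [h1, if_true]
      rw [ih (some "entities") ents rels (Or.inr (Or.inl rfl))]; rfl
    · by_cases h2 : PySem.Str.startswith (PySem.Str.strip raw) "Relationships:"
      · simp only [h1, h2, if_true]
        rw [ih (some "relationships") ents rels (Or.inr (Or.inr rfl))]; rfl
      · simp only [h1, h2]
        by_cases h3 : PySem.Str.startswith (PySem.Str.strip raw) "-" <;>
          simp at h3 <;>
          rcases hsec with h | h | h <;> subst h
        · simp [pvSecMap, ih none ents rels (Or.inl rfl), h3]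
        · cases hps : (PySem.Str.split? (PySem.Str.stripChars (PySem.Str.strip raw) "- ") ":").getD [] with
          | nil =>
            simp [hps, h3, pvSecMap, pvParseEntity,
              ih (some "entities") ents rels (Or.inr (Or.inl rfl))]
          | cons p0 tl =>
            match tl with
            | [] =>
              simp [hps, h3, pvSecMap, pvParseEntity,
                ih (some "entities") ents rels (Or.inr (Or.inl rfl))]
            | [p1] =>
              simp [hps, h3, pvSecMap, pvParseEntity,
                ih (some "entities") _ rels (Or.inr (Or.inl rfl))]
            | p1 :: p2 :: tl3 =>
              simp [hps, h3, pvSecMap, pvParseEntity,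
                ih (some "entities") ents rels (Or.inr (Or.inl rfl))]
        · cases hps : ((PySem.Str.split? (PySem.Str.stripChars (PySem.Str.strip raw) "- ()") ",").getD []).map PySem.Str.strip with
          | nil =>
            simp [hps, h3, pvSecMap, pvParseRel,
              ih (some "relationships") ents rels (Or.inr (Or.inr rfl))]
          | cons p0 tl =>
            match tl with
            | [] =>
              simp [hps, h3, pvSecMap, pvParseRel,
                ih (some "relationships") ents rels (Or.inr (Or.inr rfl))]
            | [p1] =>
              simp [hps, h3, pvSecMap, pvParseRel,
                ih (some "relationships") ents rels (Or.inr (Or.inr rfl))]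
            | [p1, p2] =>
              simp [hps, h3, pvSecMap, pvParseRel,
                ih (some "relationships") ents _ (Or.inr (Or.inr rfl))]
            | p1 :: p2 :: p3 :: tl4 =>
              simp [hps, h3, pvSecMap, pvParseRel,
                ih (some "relationships") ents rels (Or.inr (Or.inr rfl))]
        · simp [pvSecMap, ih none ents rels (Or.inl rfl), h3]
        · simp [h3, pvSecMap, pvParseEntity,
            ih (some "entities") ents rels (Or.inr (Or.inl rfl))]
        · simp [h3, pvSecMap, pvParseRel,
            ih (some "relationships") ents rels (Or.inr (Or.inr rfl))]

-- ===== VERDICT (by name: the statement is the Claim_ definition above) =====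
theorem parse_output_text_spec : Claim_equal_parse_output_text := by
  intro t _
  unfold Spec_parse_output_text parse_output_text parse_output_text_alt
  rw [pvLoop_eq_bucket _ none [] [] (Or.inl rfl)]
  simp [pvSecMap]
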